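-- pv_equiv track=rewrite | github.com/JakubMlocek/Algorithms_and_Data_Structures | bst/drzewo-punkt-przedzia.py | stworz_drzewo_pkt_prz
-- ===== SOURCE A (Python) =====
-- def stworz_drzewo_pkt_prz(l):
--     n = len(l)
--     tmp = 1
--     while (tmp < n):
--         tmp *= 2
--     t = [[0, -1, -1] for _ in range(tmp)]
--     for i in range(tmp):
--         if i < len(l):
--             t.append([l[i], i, i])
--         else:
--             t.append([0, i, i])
--     for i in range(tmp - 1, -1, -1):
--         t[i][1] = t[2 * i][1]
--         t[i][2] = t[2 * i + 1][2]
--         t[i][0] = t[2 * i][0] + t[2 * i + 1][0]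
--     return t
-- ===== SOURCE B (Python) =====
-- def stworz_drzewo_pkt_prz(l):
--     n = len(l)
--     tmp = 1
--     while tmp < n:
--         tmp *= 2
--     # build the tree bottom-up as explicit levels, then lay them out in heap order
--     level = [[l[i], i, i] if i < n else [0, i, i] for i in range(tmp)]
--     levels = [level]
--     while len(level) > 1:
--         level = [[level[2 * j][0] + level[2 * j + 1][0],
--                   level[2 * j][1],
--                   level[2 * j + 1][2]] for j in range(len(level) // 2)]
--         levels.append(level)
--     top = levels[-1][0]
--     out = [[top[0], -1, top[2]]]
--     for lev in reversed(levels):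
--         out.extend(lev)
--     return out
-- ===== Notes on version B (the rewrite author's own statement) =====
-- stated objective: alternative
-- what changed: B builds the segment tree bottom-up as explicit levels (repeatedly pairing adjacent nodes), then lays the levels out in heap order and prepends the index-0 record, instead of A's in-place downward index loop mutating a flat heap array.
import Mathlib
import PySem

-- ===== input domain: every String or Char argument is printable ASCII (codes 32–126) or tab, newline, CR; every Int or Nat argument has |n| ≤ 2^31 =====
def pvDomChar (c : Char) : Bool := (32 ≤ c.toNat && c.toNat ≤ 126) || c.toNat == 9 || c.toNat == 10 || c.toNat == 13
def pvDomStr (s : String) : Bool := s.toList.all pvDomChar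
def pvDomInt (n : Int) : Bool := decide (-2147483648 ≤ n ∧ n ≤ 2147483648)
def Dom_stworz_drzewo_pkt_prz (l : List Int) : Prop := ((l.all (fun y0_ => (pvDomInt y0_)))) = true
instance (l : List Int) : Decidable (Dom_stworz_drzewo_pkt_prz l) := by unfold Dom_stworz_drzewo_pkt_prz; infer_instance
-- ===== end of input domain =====

-- B rebuilds the segment tree bottom-up as explicit levels laid out in heap order
-- (alternative decomposition, same cost); A mutates a flat heap array with a downward index loop.

-- shared setup (both Pythons compute the padded size and the leaf records identically):
-- tmp = 1; while tmp < n: tmp *= 2   (the `1 ≤ tmp` guard only makes the recursion total; it holds on every call)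
def pow2Loop (tmp n : Nat) : Nat :=
  if _h : tmp < n ∧ 1 ≤ tmp then pow2Loop (2 * tmp) n else tmp
termination_by n - tmp
decreasing_by omega

-- [l[i], i, i] if i < len(l) else [0, i, i]
def leafF (l : List Int) (i : Nat) : List Int :=
  if i < l.length then [l.getD i 0, (i : Int), (i : Int)] else [0, (i : Int), (i : Int)]

-- ===== PORT A =====
-- t[i][j] = v  (i always in range in A)
def setAt (t : List (List Int)) (i j : Nat) (v : Int) : List (List Int) :=
  t.set i ((t.getD i []).set j v)

-- one iteration of A's downward loop body (three in-place assignments, in A's order)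
def aStep (t : List (List Int)) (i : Nat) : List (List Int) :=
  let t1 := setAt t i 1 ((t.getD (2 * i) []).getD 1 0)
  let t2 := setAt t1 i 2 ((t1.getD (2 * i + 1) []).getD 2 0)
  setAt t2 i 0 ((t2.getD (2 * i) []).getD 0 0 + (t2.getD (2 * i + 1) []).getD 0 0)

def stworz_drzewo_pkt_prz (l : List Int) : List (List Int) :=
  let n := l.length
  let tmp := pow2Loop 1 n
  let t0 := (List.range tmp).map (fun _ => ([0, -1, -1] : List Int))
  let t1 := (List.range tmp).foldl (fun t i => t ++ [leafF l i]) t0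
  ((List.range tmp).reverse).foldl aStep t1   -- for i in range(tmp-1,-1,-1)

-- ===== PORT B =====
-- [lev[2j][0]+lev[2j+1][0], lev[2j][1], lev[2j+1][2]]
def combineNode (a b : List Int) : List Int :=
  [a.getD 0 0 + b.getD 0 0, a.getD 1 0, b.getD 2 0]

def pairUp (lev : List (List Int)) : List (List Int) :=
  (List.range (lev.length / 2)).map (fun j => combineNode (lev.getD (2 * j) []) (lev.getD (2 * j + 1) []))

-- the `levels` list built by B's while loop
def levelsLoop (lev : List (List Int)) : List (List (List Int)) :=
  if _h : 1 < lev.length then lev :: levelsLoop (pairUp lev) else [lev]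
termination_by lev.length
decreasing_by simp [pairUp]; omega

def stworz_drzewo_pkt_prz_alt (l : List Int) : List (List Int) :=
  let n := l.length
  let tmp := pow2Loop 1 n
  let leaf := (List.range tmp).map (leafF l)
  let levs := levelsLoop leaf
  let top := (levs.getLastD []).getD 0 []
  levs.reverse.foldl (fun out lev => out ++ lev) [[top.getD 0 0, -1, top.getD 2 0]]

-- ===== PRECONDITION & SPEC =====
def Spec_stworz_drzewo_pkt_prz (l : List Int) (out : List (List Int)) : Prop := out = stworz_drzewo_pkt_prz_alt l
instance (l : List Int) (out : List (List Int)) : Decidable (Spec_stworz_drzewo_pkt_prz l out) := by unfold Spec_stworz_drzewo_pkt_prz; infer_instance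

-- ===== CLAIM (what is proved, stated in full; the proofs are below) =====
def Claim_equal_stworz_drzewo_pkt_prz : Prop := ∀ (l : List Int), Dom_stworz_drzewo_pkt_prz l → Spec_stworz_drzewo_pkt_prz l (stworz_drzewo_pkt_prz l)

-- ===== LEMMAS AND PROOFS =====

-- the value of heap node i in the finished tree (node 0 keeps A's leftover -1)
def specF (tmp : Nat) (lf : Nat → List Int) (i : Nat) : List Int :=
  if _h : tmp ≤ i then lf (i - tmp)
  else if _h0 : i = 0 then
    [(specF tmp lf 1).getD 0 0, -1, (specF tmp lf 1).getD 2 0]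
  else
    [(specF tmp lf (2 * i)).getD 0 0 + (specF tmp lf (2 * i + 1)).getD 0 0,
     (specF tmp lf (2 * i)).getD 1 0,
     (specF tmp lf (2 * i + 1)).getD 2 0]
termination_by 2 * tmp - i
decreasing_by all_goals omega

theorem specF_leaf (tmp : Nat) (lf : Nat → List Int) (i : Nat) (h : tmp ≤ i) :
    specF tmp lf i = lf (i - tmp) := by rw [specF]; simp [h]

theorem pow2Loop_ge_one : ∀ tmp n : Nat, 1 ≤ tmp → 1 ≤ pow2Loop tmp n := by
  intro tmp n
  fun_induction pow2Loop tmp n with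
  | case1 a hb ih => intro _; exact ih (by omega)
  | case2 a hb => exact fun h => h

theorem pow2Loop_pow : ∀ tmp n : Nat, (∃ k, tmp = 2 ^ k) → ∃ k, pow2Loop tmp n = 2 ^ k := by
  intro tmp n
  fun_induction pow2Loop tmp n with
  | case1 a hb ih =>
      rintro ⟨k, hk⟩
      exact ih ⟨k + 1, by rw [hk]; ring⟩
  | case2 a hb => exact fun h => h

theorem getD_map_range (g : Nat → List Int) (n i : Nat) (h : i < n) :
    ((List.range n).map g).getD i [] = g i := by
  rw [List.getD_eq_getElem?_getD]
  simp [h]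

theorem set_map_range (g : Nat → List Int) (n i : Nat) (v : List Int) :
    ((List.range n).map g).set i v
      = (List.range n).map (fun x => if x = i then v else g x) := by
  apply List.ext_getElem
  · simp
  · intro k hk hk'
    simp only [List.getElem_set, List.getElem_map, List.getElem_range]
    simp only [List.length_set, List.length_map, List.length_range] at hk
    by_cases hki : i = k
    · simp [hki]
    · rw [if_neg hki, if_neg (fun h => hki h.symm)]

theorem foldl_append_singleton (f : Nat → List Int) :
    ∀ (L : List Nat) (t : List (List Int)),
      L.foldl (fun t i => t ++ [f i]) t = t ++ L.map f := by
  intro L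
  induction L with
  | nil => simp
  | cons a L ih => intro t; simp [ih, List.append_assoc]

theorem foldl_append_flatten {α : Type} :
    ∀ (L : List (List α)) (t : List α),
      L.foldl (fun o lev => o ++ lev) t = t ++ L.flatten := by
  intro L
  induction L with
  | nil => simp
  | cons a L ih => intro t; simp [ih, List.append_assoc]

-- the heap array after A's loop has processed indices tmp-1 down to j
def Sstate (tmp : Nat) (lf : Nat → List Int) (j : Nat) : List (List Int) :=
  (List.range (2 * tmp)).map (fun i => if j ≤ i then specF tmp lf i else [0, -1, -1])

theorem init_eq_Sstate (l : List Int) (tmp : Nat) :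
    ((List.range tmp).map (fun _ => ([0, -1, -1] : List Int)))
        ++ (List.range tmp).map (leafF l)
      = Sstate tmp (leafF l) tmp := by
  apply List.ext_getElem
  · simp [Sstate]; omega
  · intro k hk hk'
    simp only [Sstate, List.length_map, List.length_range] at hk'
    simp only [Sstate, List.getElem_map, List.getElem_range]
    by_cases h : k < tmp
    · rw [List.getElem_append_left (by simpa using h)]
      simp [h]
    · rw [List.getElem_append_right (by simpa using h)]
      simp only [List.length_map, List.length_range]
      have htk : tmp ≤ k := by omega
      simp [List.getElem_map, List.getElem_range, htk, specF_leaf]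

theorem setAt_map_range (g : Nat → List Int) (n i jdx : Nat) (v : Int) (h : i < n) :
    setAt ((List.range n).map g) i jdx v
      = (List.range n).map (fun x => if x = i then (g i).set jdx v else g x) := by
  unfold setAt
  rw [getD_map_range g n i h, set_map_range]

theorem aStep_Sstate (tmp : Nat) (lf : Nat → List Int) (j : Nat) (hj : j < tmp) :
    aStep (Sstate tmp lf (j + 1)) j = Sstate tmp lf j := by
  have h2a : 2 * j < 2 * tmp := by omega
  have h2b : 2 * j + 1 < 2 * tmp := by omega
  have hjlt : j < 2 * tmp := by omega
  simp only [aStep, Sstate]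
  rw [getD_map_range _ _ _ h2a, setAt_map_range _ _ _ _ _ hjlt,
      getD_map_range _ _ _ h2b, setAt_map_range _ _ _ _ _ hjlt,
      getD_map_range _ _ _ h2a, getD_map_range _ _ _ h2b,
      setAt_map_range _ _ _ _ _ hjlt]
  apply List.map_congr_left
  intro x hx
  simp only [List.mem_range] at hx
  have e4 : j + 1 ≤ 2 * j + 1 := by omega
  have e5 : ¬ (j + 1 ≤ j) := by omega
  by_cases hj0 : j = 0
  · subst hj0
    by_cases hxj : x = 0
    · subst hxj
      simp only [e5, if_false, e4, if_true, Nat.mul_zero, Nat.zero_add,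
        le_refl, if_true]
      simp only [List.getD, List.set]
      conv_rhs => rw [specF]
      have ht0 : ¬ tmp ≤ 0 := by omega
      simp [ht0]
    · simp only [if_neg hxj]
      by_cases hx2 : 1 ≤ x
      · simp [hx2, show (0:Nat) ≤ x by omega]
      · omega
  · have e1 : ¬ (2 * j = j) := by omega
    have e2 : ¬ (2 * j + 1 = j) := by omega
    have e3 : j + 1 ≤ 2 * j := by omega
    by_cases hxj : x = j
    · subst hxj
      simp only [e1, if_false, e2, e3, e4, if_true, e5]
      simp only [List.set]
      conv_rhs => rw [if_pos (le_refl x), specF]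
      have ht : ¬ tmp ≤ x := by omega
      simp [ht, hj0]
    · simp only [if_neg hxj]
      by_cases hx2 : j ≤ x
      · have : j + 1 ≤ x := by omega
        simp [hx2, this]
      · have : ¬ (j + 1 ≤ x) := by omega
        simp [hx2, this]

theorem loop_inv (tmp : Nat) (lf : Nat → List Int) :
    ∀ j, j ≤ tmp →
      ((List.range j).reverse).foldl aStep (Sstate tmp lf j) = Sstate tmp lf 0 := by
  intro j
  induction j with
  | zero => intro _; simp
  | succ j ih =>
      intro h
      rw [List.range_succ, List.reverse_append]
      simp only [List.reverse_cons, List.reverse_nil, List.nil_append, List.singleton_append,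
        List.foldl_cons]
      rw [aStep_Sstate tmp lf j (by omega)]
      exact ih (by omega)

theorem A_eq (l : List Int) :
    stworz_drzewo_pkt_prz l
      = (List.range (2 * pow2Loop 1 l.length)).map (specF (pow2Loop 1 l.length) (leafF l)) := by
  show ((List.range (pow2Loop 1 l.length)).reverse).foldl aStep _ = _
  rw [foldl_append_singleton, init_eq_Sstate, loop_inv _ _ _ (le_refl _)]
  simp [Sstate]

-- B side
theorem pairUp_level (tmp : Nat) (lf : Nat → List Int) (m : Nat) (_hm : 1 ≤ m) (hmt : 2 * m ≤ tmp) :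
    pairUp ((List.range (2 * m)).map (fun j => specF tmp lf (2 * m + j)))
      = (List.range m).map (fun j => specF tmp lf (m + j)) := by
  unfold pairUp
  simp only [List.length_map, List.length_range]
  rw [show 2 * m / 2 = m by omega]
  apply List.map_congr_left
  intro j hj
  simp only [List.mem_range] at hj
  rw [getD_map_range _ _ _ (by omega), getD_map_range _ _ _ (by omega)]
  have h1 : ¬ tmp ≤ m + j := by omega
  have h2 : ¬ (m + j = 0) := by omega
  conv_rhs => rw [specF]
  simp only [dif_neg h1, dif_neg h2]
  rw [show 2 * (m + j) = 2 * m + 2 * j by ring]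
  simp [combineNode, Nat.add_assoc]

theorem levelsLoop_ne_nil (lev : List (List Int)) : levelsLoop lev ≠ [] := by
  rw [levelsLoop]; split <;> simp

theorem levelsLoop_flatten (tmp : Nat) (lf : Nat → List Int) :
    ∀ (k m : Nat), m = 2 ^ k → m ≤ tmp →
      ((levelsLoop ((List.range m).map (fun j => specF tmp lf (m + j)))).reverse.flatten
          = (List.range' 1 (2 * m - 1)).map (specF tmp lf))
        ∧ (levelsLoop ((List.range m).map (fun j => specF tmp lf (m + j)))).getLastD []
          = [specF tmp lf 1] := by
  intro k
  induction k with
  | zero =>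
      intro m hm hmt
      subst hm
      rw [levelsLoop]
      simp
  | succ k ih =>
      intro m _hm hmt
      have hm2 : m = 2 * 2 ^ k := by rw [_hm]; ring
      have hk1 : (1:Nat) ≤ 2 ^ k := Nat.one_le_two_pow
      have hlen : 1 < ((List.range m).map (fun j => specF tmp lf (m + j))).length := by
        simp [hm2]; omega
      rw [levelsLoop, dif_pos hlen]
      rw [show ((List.range m).map (fun j => specF tmp lf (m + j)))
            = ((List.range (2 * 2 ^ k)).map (fun j => specF tmp lf (2 * 2 ^ k + j))) by rw [hm2]]
      rw [pairUp_level tmp lf (2 ^ k) hk1 (by omega)]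
      obtain ⟨ihf, ihl⟩ := ih (2 ^ k) rfl (by omega)
      constructor
      · rw [List.reverse_cons, List.flatten_append, ihf]
        simp only [List.flatten_cons, List.flatten_nil, List.append_nil]
        have harr : List.range' 1 (2 * m - 1)
            = List.range' 1 (2 * 2 ^ k - 1) ++ List.range' m m := by
          have h := List.range'_append_1 (s := 1) (m := 2 * 2 ^ k - 1) (n := m)
          rw [show 1 + (2 * 2 ^ k - 1) = m by omega,
              show (2 * 2 ^ k - 1) + m = 2 * m - 1 by omega] at h
          exact h.symm
        rw [harr, List.map_append]
        congr 1
        rw [List.range'_eq_map_range, List.map_map, ← hm2]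
        apply List.map_congr_left
        intro x _
        simp
      · rw [List.getLastD_cons]
        have hne : levelsLoop ((List.range (2 ^ k)).map (fun j => specF tmp lf (2 ^ k + j))) ≠ [] :=
          levelsLoop_ne_nil _
        obtain ⟨y, hy⟩ := Option.isSome_iff_exists.mp (List.getLast?_isSome.mpr hne)
        rw [List.getLastD_eq_getLast?, hy] at ihl ⊢
        simpa using ihl

theorem B_eq (l : List Int) :
    stworz_drzewo_pkt_prz_alt l
      = (List.range (2 * pow2Loop 1 l.length)).map (specF (pow2Loop 1 l.length) (leafF l)) := by
  have h1 : 1 ≤ pow2Loop 1 l.length := pow2Loop_ge_one 1 l.length (le_refl 1)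
  obtain ⟨k, hk⟩ := pow2Loop_pow 1 l.length ⟨0, rfl⟩
  set tmp := pow2Loop 1 l.length with htmp
  have hleaf : (List.range tmp).map (leafF l)
      = (List.range tmp).map (fun j => specF tmp (leafF l) (tmp + j)) := by
    apply List.map_congr_left
    intro j _
    rw [specF_leaf tmp (leafF l) (tmp + j) (by omega)]
    congr 1
    omega
  obtain ⟨hf, hl⟩ := levelsLoop_flatten tmp (leafF l) k tmp hk (le_refl tmp)
  show (levelsLoop ((List.range tmp).map (leafF l))).reverse.foldl (fun out lev => out ++ lev) _ = _
  rw [hleaf, foldl_append_flatten, hf, hl]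
  have hhead : ([specF tmp (leafF l) 1].getD 0 []).getD 0 0 = (specF tmp (leafF l) 1).getD 0 0 := rfl
  have hhead2 : ([specF tmp (leafF l) 1].getD 0 []).getD 2 0 = (specF tmp (leafF l) 1).getD 2 0 := rfl
  rw [hhead, hhead2]
  have hspec0 : specF tmp (leafF l) 0
      = [(specF tmp (leafF l) 1).getD 0 0, -1, (specF tmp (leafF l) 1).getD 2 0] := by
    rw [specF]
    simp [show ¬ tmp ≤ 0 by omega]
  rw [show (2 * tmp) = (2 * tmp - 1) + 1 by omega, List.range_eq_range', List.range'_succ]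
  simp only [List.map_cons]
  rw [hspec0]
  rfl

-- ===== VERDICT (by name: the statement is the Claim_ definition above) =====
theorem stworz_drzewo_pkt_prz_spec : Claim_equal_stworz_drzewo_pkt_prz := by
  intro l _
  show stworz_drzewo_pkt_prz l = stworz_drzewo_pkt_prz_alt l
  rw [A_eq, B_eq]
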